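-- pv_equiv track=rewrite | github.com/stat-thon/Coding-Test-Study-2nd | Dawny/Programmers/11TH/manurenewal.py | solution
-- ===== SOURCE A (Python) =====
-- from itertools import combinations
--
-- def solution(orders, course):
--     o = list(map(sorted, orders))
--     dic = {}
--     for i in o:
--         for j in course:
--             for k in combinations(i, j):
--                 sk = ''.join(k)
--                 if sk in dic:
--                     dic[sk] += 1
--                 else:
--                     dic[sk] = 1
--
--     space = [1] * (course[-1] + 1)
--     menu = []
--     for x, y in sorted(dic.items(), key = lambda x: (-x[1], x[0])):
--         pass
--         if y > space[len(x)]: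
--             space[len(x)] = y
--             menu.append(x)
--         elif y == space[len(x)] and y != 1:
--             menu.append(x)
--
--     return sorted(menu, key = lambda x: x[0:])
-- ===== SOURCE B (Python) =====
-- from itertools import combinations
-- from collections import Counter
--
-- def solution(orders, course):
--     cnt = Counter(''.join(k) for o in orders for c in course
--                   for k in combinations(sorted(o), c))
--     best = {}
--     for s, v in cnt.items():
--         if v > best.get(len(s), 0):
--             best[len(s)] = v
--     menu = [s for s, v in cnt.items() if v >= 2 and v == best[len(s)]]
--     return sorted(menu)
-- ===== Notes on version B (the rewrite author's own statement) =====
-- stated objective: simpler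
-- what changed: B drops A's global sort of all (combo,count) pairs by (-count,key) and the stateful space[] sweep, instead computing a per-length maxima dict in one pass and filtering the counter for combos whose count equals their length's maximum and is at least 2
import Mathlib
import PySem

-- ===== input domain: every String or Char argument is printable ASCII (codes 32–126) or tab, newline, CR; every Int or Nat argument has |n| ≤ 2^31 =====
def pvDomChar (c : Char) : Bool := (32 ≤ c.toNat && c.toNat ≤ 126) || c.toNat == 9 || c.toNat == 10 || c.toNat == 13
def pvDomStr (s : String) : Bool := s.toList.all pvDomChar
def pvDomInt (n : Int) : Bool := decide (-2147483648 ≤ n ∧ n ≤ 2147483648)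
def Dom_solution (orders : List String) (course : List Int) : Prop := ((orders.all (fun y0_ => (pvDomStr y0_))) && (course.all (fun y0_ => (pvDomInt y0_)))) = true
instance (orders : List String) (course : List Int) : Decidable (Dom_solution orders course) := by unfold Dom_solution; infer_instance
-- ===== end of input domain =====

-- B replaces A's global (-count, key) sort and space[] sweep by a per-length maxima dict and a
-- single filter; same return value on all of Pre_ (objective: simpler, not claimed faster).

-- ===== PORT A =====
-- Literal port of A. sorted(...) is PySem.List.sorted; combinations is PySem.List.combinations
-- (j.toNat: Python raises ValueError for negative j — excluded by Pre_); ''.join(k) over single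
-- chars is String.ofList; 'space[len(x)]' reads/writes use getD/List.set, exact while
-- len(x) < len(space), which Pre_ guarantees (Python raises IndexError otherwise); course[-1] on
-- an empty course (IndexError, excluded by Pre_) is getLast!. Python compares strings by code
-- points, so the string sort keys are the lexicographic List Char key 'toList' (exact).
def solution (orders : List String) (course : List Int) : List String :=
  let o := orders.map (fun s => PySem.List.sorted s.toList (fun c => c) false)
  let dic := o.foldl (fun d i =>
      course.foldl (fun d j =>
        (PySem.List.combinations i j.toNat).foldl (fun d k =>
          if d.contains (String.ofList k) then
            d.insert (String.ofList k) (d.getD (String.ofList k) 0 + 1)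
          else d.insert (String.ofList k) 1) d) d)
    (PySem.Dict.empty : PySem.Dict String Int)
  let space := List.replicate (course.getLast! + 1).toNat (1 : Int)
  let fin := (PySem.List.sorted2 dic.items (fun p => -p.2) (fun p => p.1.toList) false).foldl
      (fun (st : List Int × List String) p =>
        if st.1.getD (PySem.Str.len p.1).toNat 0 < p.2 then
          (st.1.set (PySem.Str.len p.1).toNat p.2, st.2 ++ [p.1])
        else if p.2 = st.1.getD (PySem.Str.len p.1).toNat 0 ∧ p.2 ≠ 1 then (st.1, st.2 ++ [p.1])
        else (st.1, st.2)) (space, ([] : List String))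
  PySem.List.sorted fin.2 (fun x => x.toList) false  -- sorted(menu, key=lambda x: x[0:]): the key is the identity slice

-- ===== PORT B =====
-- Literal port of Source B: Counter over the same generator, per-length maxima dict 'best',
-- comprehension filter, final sort (string comparison via the 'toList' key, as in port A).
def solution_alt (orders : List String) (course : List Int) : List String :=
  let cnt := PySem.Dict.counter (orders.flatMap (fun o =>
      course.flatMap (fun c =>
        (PySem.List.combinations (PySem.List.sorted o.toList (fun ch => ch) false) c.toNat).map
          (fun k => String.ofList k))))
  let best := cnt.items.foldl (fun b p =>
      if b.getD (PySem.Str.len p.1) 0 < p.2 then b.insert (PySem.Str.len p.1) p.2 else b)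
    (PySem.Dict.empty : PySem.Dict Int Int)
  let menu := (cnt.items.filter (fun p =>
      decide (2 ≤ p.2) && decide (p.2 = best.getD (PySem.Str.len p.1) 0))).map (fun p => p.1)
  PySem.List.sorted menu (fun x => x.toList) false

-- ===== PRECONDITION & SPEC =====
-- Pre_ is exactly where the Python A returns normally: course nonempty (course[-1]), and — unless
-- orders is empty, in which case no combination is ever formed — every course size nonnegative
-- (combinations raises ValueError on negative sizes) and no size both exceeds course[-1] (A's space
-- array bound) and is reached by some order (which would index space out of range: IndexError).
def Pre_solution (orders : List String) (course : List Int) : Prop :=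
  course ≠ [] ∧ (orders = [] ∨
    ((∀ j ∈ course, 0 ≤ j) ∧
     ∀ j ∈ course, j ≤ course.getLast! ∨ ∀ s ∈ orders, PySem.Str.len s < j))
instance (orders : List String) (course : List Int) : Decidable (Pre_solution orders course) := by
  unfold Pre_solution; infer_instance
def pvWitness_solution : List String × List Int := (["ab", "ac"], [2])

def Spec_solution (orders : List String) (course : List Int) (out : List String) : Prop :=
  out = solution_alt orders course
instance (orders : List String) (course : List Int) (out : List String) : Decidable (Spec_solution orders course out) := by
  unfold Spec_solution; infer_instance

-- ===== CLAIM (what is proved, stated in full; the proofs are below) =====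
def Claim_equal_solution : Prop := ∀ (orders : List String) (course : List Int), Dom_solution orders course → Pre_solution orders course → Spec_solution orders course (solution orders course)

-- ===== LEMMAS AND PROOFS =====

-- per-length running maximum of the counts in an item list (0 when the length is absent);
-- this is what B's 'best' dict stores, and what A's space[] sweep implicitly tracks
def pvM (l : List (String × Int)) (L : Int) : Int :=
  l.foldr (fun p m => if PySem.Str.len p.1 = L then max p.2 m else m) 0

theorem pvM_cons (p : String × Int) (l : List (String × Int)) (L : Int) :
    pvM (p :: l) L = if PySem.Str.len p.1 = L then max p.2 (pvM l L) else pvM l L := rfl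

theorem pvM_nonneg (l : List (String × Int)) (L : Int) : 0 ≤ pvM l L := by
  induction l with
  | nil => simp [pvM]
  | cons p l ih => rw [pvM_cons]; split <;> simp [le_max_of_le_right ih, ih]

theorem pvM_le (l : List (String × Int)) (L c : Int) (hc : 0 ≤ c)
    (h : ∀ q ∈ l, PySem.Str.len q.1 = L → q.2 ≤ c) : pvM l L ≤ c := by
  induction l with
  | nil => simpa [pvM] using hc
  | cons p l ih =>
    rw [pvM_cons]
    have ih' := ih (fun q hq => h q (List.mem_cons_of_mem _ hq))
    split
    · exact max_le (h p List.mem_cons_self (by assumption)) ih'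
    · exact ih'

theorem pvM_perm (l l' : List (String × Int)) (L : Int) (h : l.Perm l') : pvM l L = pvM l' L := by
  unfold pvM
  exact h.foldr_eq (lcomm := ⟨by
    intro a b m
    split_ifs <;> simp [max_left_comm]⟩) 0

-- ===== B's 'best' dict holds exactly the per-length maxima =====
theorem pvBest_getD (l : List (String × Int)) (b : PySem.Dict Int Int) (L : Int) :
    (l.foldl (fun b p =>
        if b.getD (PySem.Str.len p.1) 0 < p.2 then b.insert (PySem.Str.len p.1) p.2 else b) b).getD L 0
      = l.foldr (fun p m => if PySem.Str.len p.1 = L then max p.2 m else m) (b.getD L 0) := by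
  induction l generalizing b with
  | nil => rfl
  | cons p l ih =>
    rw [List.foldl_cons, ih, List.foldr_cons]
    have hstep : ∀ (b : PySem.Dict Int Int),
        ((if b.getD (PySem.Str.len p.1) 0 < p.2 then b.insert (PySem.Str.len p.1) p.2 else b) : PySem.Dict Int Int).getD L 0
          = if PySem.Str.len p.1 = L then max p.2 (b.getD L 0) else b.getD L 0 := by
      intro b
      by_cases hL : PySem.Str.len p.1 = L
      · by_cases hlt : b.getD (PySem.Str.len p.1) 0 < p.2
        · rw [if_pos hlt, PySem.Dict.getD_insert, if_pos hL.symm, if_pos hL]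
          rw [hL] at hlt
          exact (max_eq_left hlt.le).symm
        · rw [if_neg hlt, if_pos hL]
          rw [hL] at hlt
          exact (max_eq_right (not_lt.1 hlt)).symm
      · by_cases hlt : b.getD (PySem.Str.len p.1) 0 < p.2
        · rw [if_pos hlt, PySem.Dict.getD_insert, if_neg (fun h => hL h.symm), if_neg hL]
        · rw [if_neg hlt, if_neg hL]
    rw [hstep]
    have hswap : ∀ (l : List (String × Int)) (a x : Int),
        l.foldr (fun p m => if PySem.Str.len p.1 = L then max p.2 m else m) (max a x)
          = max a (l.foldr (fun p m => if PySem.Str.len p.1 = L then max p.2 m else m) x) := by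
      intro l a x
      induction l with
      | nil => rfl
      | cons q l ihq => simp only [List.foldr_cons, ihq]; split_ifs <;> simp [max_left_comm]
    split_ifs with h
    · rw [hswap]
    · rfl

-- ===== the sorted2 pass of port A emits the items with counts descending =====
theorem pvInsertBy_pairwise {α : Type} (R : α → α → Prop) (before : α → α → Bool)
    (htrans : ∀ a b c, R a b → R b c → R a c)
    (ht : ∀ a b, before a b = true → R a b) (hf : ∀ a b, before a b = false → R b a)
    (x : α) (ys : List α) (hy : ys.Pairwise R) :
    (PySem.List.insertBy before x ys).Pairwise R := by
  induction ys with
  | nil => simp [PySem.List.insertBy]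
  | cons y ys ih =>
    rw [List.pairwise_cons] at hy
    simp only [PySem.List.insertBy]
    split_ifs with h
    · refine List.pairwise_cons.2 ⟨?_, List.pairwise_cons.2 ⟨hy.1, hy.2⟩⟩
      intro z hz
      rcases List.mem_cons.1 hz with rfl | hz'
      · exact ht _ _ h
      · exact htrans _ _ _ (ht _ _ h) (hy.1 z hz')
    · refine List.pairwise_cons.2 ⟨?_, ih hy.2⟩
      intro z hz
      rcases (PySem.List.mem_insertBy before x z ys).1 hz with rfl | hz'
      · exact hf _ _ (by simpa using h)
      · exact hy.1 z hz'

theorem pvFoldl_insertBy_pairwise {α : Type} (R : α → α → Prop) (before : α → α → Bool)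
    (htrans : ∀ a b c, R a b → R b c → R a c)
    (ht : ∀ a b, before a b = true → R a b) (hf : ∀ a b, before a b = false → R b a)
    (xs : List α) : ∀ (acc : List α), acc.Pairwise R →
    (xs.foldl (fun acc x => PySem.List.insertBy before x acc) acc).Pairwise R := by
  induction xs with
  | nil => intro acc h; exact h
  | cons x xs ih =>
    intro acc h
    rw [List.foldl_cons]
    exact ih _ (pvInsertBy_pairwise R before htrans ht hf x acc h)

theorem pvSorted2_pairwise (xs : List (String × Int)) :
    (PySem.List.sorted2 xs (fun p => -p.2) (fun p => p.1.toList) false).Pairwise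
      (fun a b : String × Int => b.2 ≤ a.2) := by
  refine pvFoldl_insertBy_pairwise (fun a b : String × Int => b.2 ≤ a.2)
    (fun a b : String × Int =>
      decide (-a.2 < -b.2) || (!decide (-b.2 < -a.2) && decide (a.1.toList < b.1.toList)))
    (fun a b c h1 h2 => le_trans h2 h1) ?_ ?_ xs [] List.Pairwise.nil
  · intro a b hab
    simp only [Bool.or_eq_true, Bool.and_eq_true, Bool.not_eq_true', decide_eq_true_eq,
      decide_eq_false_iff_not] at hab
    rcases hab with h | ⟨h, _⟩ <;> omega
  · intro a b hab
    simp only [Bool.or_eq_false_iff, decide_eq_false_iff_not] at hab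
    have := hab.1
    omega

-- length indices: Str.len is a nonnegative Int, so toNat is faithful
theorem pvLen_toNat_ne {a b : String} (h : PySem.Str.len a ≠ PySem.Str.len b) :
    (PySem.Str.len a).toNat ≠ (PySem.Str.len b).toNat := by
  simp only [PySem.Str.len_eq] at *
  omega

-- ===== A's space/menu sweep over the count-descending items selects, per length, the ties
-- at the running maximum provided it is at least 2 =====
theorem pvScan (l : List (String × Int)) (space : List Int) (menu : List String)
    (hs : l.Pairwise (fun a b : String × Int => b.2 ≤ a.2))
    (hlen : ∀ p ∈ l, (PySem.Str.len p.1).toNat < space.length)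
    (hinv : ∀ p ∈ l, space.getD (PySem.Str.len p.1).toNat 0 = 1 ∨
        (2 ≤ space.getD (PySem.Str.len p.1).toNat 0 ∧
         ∀ q ∈ l, PySem.Str.len q.1 = PySem.Str.len p.1 → q.2 ≤ space.getD (PySem.Str.len p.1).toNat 0)) :
    (l.foldl (fun (st : List Int × List String) p =>
        if st.1.getD (PySem.Str.len p.1).toNat 0 < p.2 then
          (st.1.set (PySem.Str.len p.1).toNat p.2, st.2 ++ [p.1])
        else if p.2 = st.1.getD (PySem.Str.len p.1).toNat 0 ∧ p.2 ≠ 1 then (st.1, st.2 ++ [p.1])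
        else (st.1, st.2)) (space, menu)).2
      = menu ++ (l.filter (fun p =>
          decide (2 ≤ p.2 ∧ p.2 = max (space.getD (PySem.Str.len p.1).toNat 0) (pvM l (PySem.Str.len p.1))))).map Prod.fst := by
  induction l generalizing space menu with
  | nil => simp
  | cons p rest ih =>
    obtain ⟨hsp, hsrest⟩ := List.pairwise_cons.1 hs
    have hLlt := hlen p List.mem_cons_self
    have hinvp := hinv p List.mem_cons_self
    rw [List.foldl_cons, List.filter_cons]
    dsimp only
    rcases hinvp with hs1 | ⟨h2sL, hdom⟩
    · -- space slot still 1: p is the first item of its length; kept iff its count ≥ 2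
      by_cases hv : 1 < p.2
      · -- appended, slot set to p.2
        have hMr : pvM rest (PySem.Str.len p.1) ≤ p.2 :=
          pvM_le rest _ _ (by omega) (fun q hq _ => hsp q hq)
        have hMv : pvM (p :: rest) (PySem.Str.len p.1) = p.2 := by
          rw [pvM_cons, if_pos rfl]
          exact max_eq_left hMr
        have hpredp : (decide (2 ≤ p.2 ∧ p.2 = max (space.getD (PySem.Str.len p.1).toNat 0) (pvM (p :: rest) (PySem.Str.len p.1)))) = true := by
          rw [hs1, hMv]
          exact decide_eq_true ⟨by omega, (max_eq_right (by omega)).symm⟩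
        rw [if_pos (show space.getD (PySem.Str.len p.1).toNat 0 < p.2 by omega), hpredp, if_pos rfl]
        have hget1 : (space.set (PySem.Str.len p.1).toNat p.2).getD (PySem.Str.len p.1).toNat 0 = p.2 := by
          rw [List.getD_eq_getElem?_getD, List.getElem?_set_self (by omega), Option.getD_some]
        have hlen' : ∀ q ∈ rest, (PySem.Str.len q.1).toNat < (space.set (PySem.Str.len p.1).toNat p.2).length := by
          intro q hq; rw [List.length_set]; exact hlen q (List.mem_cons_of_mem _ hq)
        have hgetne : ∀ (q : String × Int), PySem.Str.len q.1 ≠ PySem.Str.len p.1 →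
            (space.set (PySem.Str.len p.1).toNat p.2).getD (PySem.Str.len q.1).toNat 0 = space.getD (PySem.Str.len q.1).toNat 0 := by
          intro q hq
          have hne := pvLen_toNat_ne hq
          rw [List.getD_eq_getElem?_getD, List.getElem?_set_ne (fun h => hne h.symm), ← List.getD_eq_getElem?_getD]
        have hinv' : ∀ q ∈ rest, (space.set (PySem.Str.len p.1).toNat p.2).getD (PySem.Str.len q.1).toNat 0 = 1 ∨
            (2 ≤ (space.set (PySem.Str.len p.1).toNat p.2).getD (PySem.Str.len q.1).toNat 0 ∧
             ∀ r ∈ rest, PySem.Str.len r.1 = PySem.Str.len q.1 → r.2 ≤ (space.set (PySem.Str.len p.1).toNat p.2).getD (PySem.Str.len q.1).toNat 0) := by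
          intro q hq
          by_cases hL : PySem.Str.len q.1 = PySem.Str.len p.1
          · rw [hL, hget1]
            exact Or.inr ⟨by omega, fun r hr _ => hsp r hr⟩
          · rw [hgetne q hL]
            rcases hinv q (List.mem_cons_of_mem _ hq) with h | ⟨ha, hb⟩
            · exact Or.inl h
            · exact Or.inr ⟨ha, fun r hr hrL => hb r (List.mem_cons_of_mem _ hr) hrL⟩
        rw [ih (space.set (PySem.Str.len p.1).toNat p.2) (menu ++ [p.1]) hsrest hlen' hinv']
        have hfc : rest.filter (fun q =>
              decide (2 ≤ q.2 ∧ q.2 = max ((space.set (PySem.Str.len p.1).toNat p.2).getD (PySem.Str.len q.1).toNat 0) (pvM rest (PySem.Str.len q.1))))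
            = rest.filter (fun q =>
              decide (2 ≤ q.2 ∧ q.2 = max (space.getD (PySem.Str.len q.1).toNat 0) (pvM (p :: rest) (PySem.Str.len q.1)))) := by
          apply List.filter_congr
          intro q hq
          by_cases hL : PySem.Str.len q.1 = PySem.Str.len p.1
          · rw [hL, hget1, pvM_cons, if_pos rfl, hs1, max_eq_left hMr,
              max_eq_right (show (1:Int) ≤ p.2 by omega)]
          · rw [hgetne q hL, pvM_cons, if_neg (fun h => hL h.symm)]
        rw [hfc, List.map_cons]
        simp
      · -- count ≤ 1: dropped, space unchanged
        have hpredp : (decide (2 ≤ p.2 ∧ p.2 = max (space.getD (PySem.Str.len p.1).toNat 0) (pvM (p :: rest) (PySem.Str.len p.1)))) = false :=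
          decide_eq_false (fun h => by omega)
        rw [if_neg (show ¬ space.getD (PySem.Str.len p.1).toNat 0 < p.2 by omega),
          if_neg (show ¬ (p.2 = space.getD (PySem.Str.len p.1).toNat 0 ∧ p.2 ≠ 1) by
            rintro ⟨h1, h2⟩; rw [hs1] at h1; exact h2 h1),
          hpredp, if_neg (by simp)]
        have hinv' : ∀ q ∈ rest, space.getD (PySem.Str.len q.1).toNat 0 = 1 ∨
            (2 ≤ space.getD (PySem.Str.len q.1).toNat 0 ∧
             ∀ r ∈ rest, PySem.Str.len r.1 = PySem.Str.len q.1 → r.2 ≤ space.getD (PySem.Str.len q.1).toNat 0) := by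
          intro q hq
          rcases hinv q (List.mem_cons_of_mem _ hq) with h | ⟨ha, hb⟩
          · exact Or.inl h
          · exact Or.inr ⟨ha, fun r hr hrL => hb r (List.mem_cons_of_mem _ hr) hrL⟩
        rw [ih space menu hsrest (fun q hq => hlen q (List.mem_cons_of_mem _ hq)) hinv']
        have hfc : rest.filter (fun q =>
              decide (2 ≤ q.2 ∧ q.2 = max (space.getD (PySem.Str.len q.1).toNat 0) (pvM rest (PySem.Str.len q.1))))
            = rest.filter (fun q =>
              decide (2 ≤ q.2 ∧ q.2 = max (space.getD (PySem.Str.len q.1).toNat 0) (pvM (p :: rest) (PySem.Str.len q.1)))) := by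
          apply List.filter_congr
          intro q hq
          by_cases hL : PySem.Str.len q.1 = PySem.Str.len p.1
          · have hmm : max 1 (max p.2 (pvM rest (PySem.Str.len p.1))) = max 1 (pvM rest (PySem.Str.len p.1)) := by
              rw [← max_assoc, max_eq_left (show p.2 ≤ 1 by omega)]
            rw [hL, hs1, pvM_cons, if_pos rfl, hmm]
          · rw [pvM_cons, if_neg (fun h => hL h.symm)]
        rw [hfc]
    · -- slot already carries the (≥ 2) maximum of this length over the whole list
      have hvsl : p.2 ≤ space.getD (PySem.Str.len p.1).toNat 0 := hdom p List.mem_cons_self rfl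
      have hMl : pvM (p :: rest) (PySem.Str.len p.1) ≤ space.getD (PySem.Str.len p.1).toNat 0 :=
        pvM_le _ _ _ (by omega) (fun q hq hqL => hdom q hq hqL)
      have hpredeq : (decide (2 ≤ p.2 ∧ p.2 = max (space.getD (PySem.Str.len p.1).toNat 0) (pvM (p :: rest) (PySem.Str.len p.1))))
          = decide (p.2 = space.getD (PySem.Str.len p.1).toNat 0 ∧ p.2 ≠ 1) := by
        rw [max_eq_left hMl]
        apply decide_eq_decide.2
        constructor
        · rintro ⟨h1, h2⟩; exact ⟨h2, by omega⟩
        · rintro ⟨h1, h2⟩; exact ⟨by omega, h1⟩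
      have hinv' : ∀ q ∈ rest, space.getD (PySem.Str.len q.1).toNat 0 = 1 ∨
          (2 ≤ space.getD (PySem.Str.len q.1).toNat 0 ∧
           ∀ r ∈ rest, PySem.Str.len r.1 = PySem.Str.len q.1 → r.2 ≤ space.getD (PySem.Str.len q.1).toNat 0) := by
        intro q hq
        rcases hinv q (List.mem_cons_of_mem _ hq) with h | ⟨ha, hb⟩
        · exact Or.inl h
        · exact Or.inr ⟨ha, fun r hr hrL => hb r (List.mem_cons_of_mem _ hr) hrL⟩
      have hfc : rest.filter (fun q =>
            decide (2 ≤ q.2 ∧ q.2 = max (space.getD (PySem.Str.len q.1).toNat 0) (pvM rest (PySem.Str.len q.1))))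
          = rest.filter (fun q =>
            decide (2 ≤ q.2 ∧ q.2 = max (space.getD (PySem.Str.len q.1).toNat 0) (pvM (p :: rest) (PySem.Str.len q.1)))) := by
        apply List.filter_congr
        intro q hq
        by_cases hL : PySem.Str.len q.1 = PySem.Str.len p.1
        · have hMr : pvM rest (PySem.Str.len p.1) ≤ space.getD (PySem.Str.len p.1).toNat 0 :=
            pvM_le _ _ _ (by omega) (fun r hr hrL => hdom r (List.mem_cons_of_mem _ hr) hrL)
          have hMl' : max p.2 (pvM rest (PySem.Str.len p.1)) ≤ space.getD (PySem.Str.len p.1).toNat 0 := by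
            rw [pvM_cons, if_pos rfl] at hMl
            exact hMl
          rw [hL, pvM_cons, if_pos rfl, max_eq_left hMr, max_eq_left hMl']
        · rw [pvM_cons, if_neg (fun h => hL h.symm)]
      by_cases hcond : p.2 = space.getD (PySem.Str.len p.1).toNat 0 ∧ p.2 ≠ 1
      · rw [if_neg (show ¬ space.getD (PySem.Str.len p.1).toNat 0 < p.2 by omega), if_pos hcond,
          hpredeq, decide_eq_true hcond, if_pos rfl,
          ih space (menu ++ [p.1]) hsrest (fun q hq => hlen q (List.mem_cons_of_mem _ hq)) hinv', hfc, List.map_cons]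
        simp
      · rw [if_neg (show ¬ space.getD (PySem.Str.len p.1).toNat 0 < p.2 by omega), if_neg hcond,
          hpredeq, decide_eq_false hcond, if_neg (by simp),
          ih space menu hsrest (fun q hq => hlen q (List.mem_cons_of_mem _ hq)) hinv', hfc]

-- String.toList is injective (two strings with the same character list are equal)
theorem pvToList_inj : Function.Injective String.toList := by
  intro a b h
  have := congrArg String.ofList h
  simpa using this

-- PySem.List.sorted does not depend on which Decidable instance witnesses the comparisons
theorem pvSorted_irrel (xs : List String) (d1 d2 : DecidableLT (List Char)) :
    @PySem.List.sorted String (List Char) List.instLT d1 xs (fun x => x.toList) false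
      = @PySem.List.sorted String (List Char) List.instLT d2 xs (fun x => x.toList) false := by
  rw [show d1 = d2 from funext fun a => funext fun b => Subsingleton.elim _ _]

-- the heart of the equivalence: on any item list whose key lengths fit the space array,
-- A's sort+sweep pipeline and B's maxima-dict filter produce the same sorted menu
theorem pvCore (its : List (String × Int)) (n : Nat)
    (hkl : ∀ p ∈ its, (PySem.Str.len p.1).toNat < n) :
    PySem.List.sorted
      ((PySem.List.sorted2 its (fun p => -p.2) (fun p => p.1.toList) false).foldl
        (fun (st : List Int × List String) p =>
          if st.1.getD (PySem.Str.len p.1).toNat 0 < p.2 then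
            (st.1.set (PySem.Str.len p.1).toNat p.2, st.2 ++ [p.1])
          else if p.2 = st.1.getD (PySem.Str.len p.1).toNat 0 ∧ p.2 ≠ 1 then (st.1, st.2 ++ [p.1])
          else (st.1, st.2)) (List.replicate n (1 : Int), ([] : List String))).2
      (fun x => x.toList) false
    = PySem.List.sorted
        ((its.filter (fun p =>
            decide (2 ≤ p.2) && decide (p.2 = (its.foldl (fun b p =>
                if b.getD (PySem.Str.len p.1) 0 < p.2 then b.insert (PySem.Str.len p.1) p.2 else b)
              (PySem.Dict.empty : PySem.Dict Int Int)).getD (PySem.Str.len p.1) 0))).map (fun p => p.1))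
        (fun x => x.toList) false := by
  have hperm := PySem.List.sorted2_perm its (fun p => -p.2) (fun p => p.1.toList) false
  have hs := pvSorted2_pairwise its
  have hget : ∀ p ∈ PySem.List.sorted2 its (fun p => -p.2) (fun p => p.1.toList) false,
      (List.replicate n (1 : Int)).getD (PySem.Str.len p.1).toNat 0 = 1 := by
    intro p hp
    rw [List.getD_eq_getElem?_getD, List.getElem?_replicate, if_pos (hkl p (hperm.subset hp))]
    rfl
  have hlen : ∀ p ∈ PySem.List.sorted2 its (fun p => -p.2) (fun p => p.1.toList) false,
      (PySem.Str.len p.1).toNat < (List.replicate n (1 : Int)).length := by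
    intro p hp
    rw [List.length_replicate]
    exact hkl p (hperm.subset hp)
  rw [pvScan _ _ _ hs hlen (fun p hp => Or.inl (hget p hp)), List.nil_append]
  have hbest : ∀ L, ((its.foldl (fun b p =>
      if b.getD (PySem.Str.len p.1) 0 < p.2 then b.insert (PySem.Str.len p.1) p.2 else b)
      (PySem.Dict.empty : PySem.Dict Int Int)).getD L 0) = pvM its L := by
    intro L
    rw [pvBest_getD, PySem.Dict.getD_empty]
    rfl
  have hpred : ∀ q ∈ PySem.List.sorted2 its (fun p => -p.2) (fun p => p.1.toList) false,
      (decide (2 ≤ q.2 ∧ q.2 = max ((List.replicate n (1 : Int)).getD (PySem.Str.len q.1).toNat 0)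
          (pvM (PySem.List.sorted2 its (fun p => -p.2) (fun p => p.1.toList) false) (PySem.Str.len q.1))))
        = (decide (2 ≤ q.2) && decide (q.2 = (its.foldl (fun b p =>
            if b.getD (PySem.Str.len p.1) 0 < p.2 then b.insert (PySem.Str.len p.1) p.2 else b)
          (PySem.Dict.empty : PySem.Dict Int Int)).getD (PySem.Str.len q.1) 0)) := by
    intro q hq
    rw [hget q hq, pvM_perm _ _ _ hperm, hbest, ← Bool.decide_and]
    apply decide_eq_decide.2
    have hM0 := pvM_nonneg its (PySem.Str.len q.1)
    constructor
    · rintro ⟨h1, h2⟩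
      refine ⟨h1, ?_⟩
      rcases le_total (pvM its (PySem.Str.len q.1)) 1 with h | h
      · rw [max_eq_left h] at h2; omega
      · rw [max_eq_right h] at h2; exact h2
    · rintro ⟨h1, h2⟩
      refine ⟨h1, ?_⟩
      rw [max_eq_right (by omega : (1 : Int) ≤ pvM its (PySem.Str.len q.1))]
      exact h2
  rw [List.filter_congr hpred]
  exact ((pvSorted_irrel _ _ _).trans
    (PySem.List.sorted_eq_sorted_of_perm _ _ _ pvToList_inj ((hperm.filter _).map _))).trans
    (pvSorted_irrel _ _ _)

-- ===== assembling the two programs =====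
theorem solution_eq_alt (orders : List String) (course : List Int)
    (hpre : Pre_solution orders course) : solution orders course = solution_alt orders course := by
  simp only [solution, solution_alt]
  -- the two counting loops build the same counter
  have hstep : ∀ (d : PySem.Dict String Int) (s : String),
      (if d.contains s then d.insert s (d.getD s 0 + 1) else d.insert s 1) = d.insert s (d.getD s 0 + 1) := by
    intro d s
    by_cases h : d.contains s
    · rw [if_pos h]
    · rw [if_neg (by simpa using h), PySem.Dict.getD_of_not_contains d 0 (by simpa using h)]
      norm_num
  have hdic :
      (orders.map (fun s => PySem.List.sorted s.toList (fun c => c) false)).foldl (fun d i =>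
        course.foldl (fun d j =>
          (PySem.List.combinations i j.toNat).foldl (fun d k =>
            if d.contains (String.ofList k) then
              d.insert (String.ofList k) (d.getD (String.ofList k) 0 + 1)
            else d.insert (String.ofList k) 1) d) d)
        (PySem.Dict.empty : PySem.Dict String Int)
      = PySem.Dict.counter (orders.flatMap (fun o =>
          course.flatMap (fun c =>
            (PySem.List.combinations (PySem.List.sorted o.toList (fun ch => ch) false) c.toNat).map
              (fun k => String.ofList k)))) := by
    rw [← PySem.Dict.foldl_insert_getD_add_one_eq_counter]
    simp only [List.foldl_flatMap, List.foldl_map, hstep]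
  rw [hdic]
  apply pvCore
  intro p hp
  rw [PySem.Dict.items_counter] at hp
  obtain ⟨k, hk, rfl⟩ := List.mem_map.1 hp
  have hk' : k ∈ orders.flatMap (fun o =>
      course.flatMap (fun c =>
        (PySem.List.combinations (PySem.List.sorted o.toList (fun ch => ch) false) c.toNat).map
          (fun k => String.ofList k))) := (PySem.Set.mem_ofList _ _).1 hk
  obtain ⟨o, ho, hk2⟩ := List.mem_flatMap.1 hk'
  obtain ⟨c, hc, hk3⟩ := List.mem_flatMap.1 hk2
  obtain ⟨kl, hklm, rfl⟩ := List.mem_map.1 hk3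
  have hlen0 : PySem.Str.len (String.ofList kl) = (kl.length : Int) := by
    simp [PySem.Str.len_eq]
  have hklen : kl.length = c.toNat := ((PySem.List.mem_combinations_iff _ _ _).1 hklm).2
  rcases hpre.2 with rfl | ⟨hnn, hbound⟩
  · cases ho
  · rcases hbound c hc with hle | hbig
    · have h0 := hnn c hc
      rw [hlen0]
      omega
    · exfalso
      have hlt : (PySem.List.sorted o.toList (fun ch => ch) false).length < c.toNat := by
        have := hbig o ho
        rw [PySem.List.length_sorted]
        simp only [PySem.Str.len_eq] at this
        omega
      rw [PySem.List.combinations_eq_nil_of_length_lt _ hlt] at hklm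
      cases hklm

-- ===== VERDICT (by name: the statement is the Claim_ definition above) =====
theorem solution_spec : Claim_equal_solution := by
  intro orders course _ hpre
  exact solution_eq_alt orders course hpre
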